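-- pv_equiv track=rewrite | github.com/danialcodes/CSE220 | Assignments/Lab 1/Assignment 1.py | return_linear
-- ===== SOURCE A (Python) =====
-- def return_linear(cir1, start_1, size_1, cir2, start_2, size_2):
--     temp_start_2 = start_2
--     matched = [0] * size_1
--     match_count = 0
--     for i in range(size_1):
--         for j in range(size_2):
--             if (cir1[start_1] == cir2[start_2]):
--                 matched[match_count] = cir1[start_1]
--                 match_count += 1
--             start_2 = (start_2 + 1) % len(cir2)
--         start_1 = (start_1 + 1) % len(cir1)
--         start_2 = temp_start_2
--     nw_arr = [0] * match_count
--     for i in range(match_count):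
--         nw_arr[i] = matched[i]
--     return nw_arr
-- ===== SOURCE B (Python) =====
-- def return_linear(cir1, start_1, size_1, cir2, start_2, size_2):
--     # Count the cir2 window once, then one lookup per cir1 window element.
--     if size_1 <= 0:
--         return []
--     counts = {}
--     for j in range(size_2):
--         v = cir2[(start_2 + j) % len(cir2)]
--         counts[v] = counts.get(v, 0) + 1
--     out = []
--     for i in range(size_1):
--         v = cir1[(start_1 + i) % len(cir1)]
--         out.extend([v] * counts.get(v, 0))
--     return out
-- ===== Notes on version B (the rewrite author's own statement) =====
-- stated objective: faster
-- what changed: B replaces A's nested scan of the cir2 window (re-walked for every cir1 window element, with a fixed-size scratch array) by a dict counter of the cir2 window built once, then one O(1) lookup per cir1 window element, emitting each value count-many times.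
import Mathlib
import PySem

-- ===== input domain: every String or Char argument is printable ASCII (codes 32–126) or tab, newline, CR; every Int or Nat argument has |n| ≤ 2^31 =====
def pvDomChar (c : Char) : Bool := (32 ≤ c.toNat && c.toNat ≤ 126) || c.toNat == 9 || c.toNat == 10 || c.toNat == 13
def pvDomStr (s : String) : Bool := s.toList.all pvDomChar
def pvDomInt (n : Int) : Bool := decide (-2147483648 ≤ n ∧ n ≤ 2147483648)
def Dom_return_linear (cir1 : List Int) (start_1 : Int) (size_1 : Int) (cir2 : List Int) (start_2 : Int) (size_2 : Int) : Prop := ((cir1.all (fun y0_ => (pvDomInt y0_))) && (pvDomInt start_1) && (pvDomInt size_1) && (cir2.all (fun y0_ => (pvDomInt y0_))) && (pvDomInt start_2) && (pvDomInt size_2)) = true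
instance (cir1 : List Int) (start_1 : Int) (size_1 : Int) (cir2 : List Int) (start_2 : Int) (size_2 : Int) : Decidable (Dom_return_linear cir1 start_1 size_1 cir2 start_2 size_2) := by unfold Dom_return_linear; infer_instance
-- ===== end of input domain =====

-- B replaces A's O(size_1*size_2) nested window scan by a counter of the cir2 window built once
-- plus one lookup per cir1 window element (O(size_1+size_2)); equivalence is about the return value.

-- ===== PORT A =====
def return_linear (cir1 : List Int) (start_1 : Int) (size_1 : Int) (cir2 : List Int) (start_2 : Int) (size_2 : Int) : List Int :=
  let temp_start_2 := start_2
  let matched : List Int := List.replicate size_1.toNat 0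
  let match_count : Int := 0
  let st := (PySem.List.pyRange 0 size_1 1).foldl
    (fun (s : Int × Int × List Int × Int) _ =>
      let inner := (PySem.List.pyRange 0 size_2 1).foldl
        (fun (t : Int × List Int × Int) _ =>
          let t' :=
            if (PySem.List.pyGet? cir1 s.1).getD 0 = (PySem.List.pyGet? cir2 t.1).getD 0 then
              (PySem.List.pySetD t.2.1 t.2.2 ((PySem.List.pyGet? cir1 s.1).getD 0), t.2.2 + 1)
            else (t.2.1, t.2.2)
          (PySem.Int.mod (t.1 + 1) (cir2.length : Int), t'.1, t'.2))
        (s.2.1, s.2.2.1, s.2.2.2)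
      (PySem.Int.mod (s.1 + 1) (cir1.length : Int), temp_start_2, inner.2))
    (start_1, start_2, matched, match_count)
  let nw_arr : List Int := List.replicate st.2.2.2.toNat 0
  (PySem.List.pyRange 0 st.2.2.2 1).foldl
    (fun arr i => PySem.List.pySetD arr i ((PySem.List.pyGet? st.2.2.1 i).getD 0)) nw_arr

-- ===== PORT B =====
def return_linear_alt (cir1 : List Int) (start_1 : Int) (size_1 : Int) (cir2 : List Int) (start_2 : Int) (size_2 : Int) : List Int :=
  if size_1 ≤ 0 then []
  else
    let counts := (PySem.List.pyRange 0 size_2 1).foldl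
      (fun (d : PySem.Dict Int Int) j =>
        let v := (PySem.List.pyGet? cir2 (PySem.Int.mod (start_2 + j) (cir2.length : Int))).getD 0
        d.insert v (d.getD v 0 + 1)) PySem.Dict.empty
    (PySem.List.pyRange 0 size_1 1).foldl
      (fun out i =>
        let v := (PySem.List.pyGet? cir1 (PySem.Int.mod (start_1 + i) (cir1.length : Int))).getD 0
        out ++ List.replicate (counts.getD v 0).toNat v) []

-- ===== PRECONDITION & SPEC =====
-- the circular window of length `cnt` starting at (normalised) position `s`
def pvWin (xs : List Int) (s : Int) (cnt : Int) : List Int :=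
  (List.range cnt.toNat).map
    (fun (i : Nat) => (PySem.List.pyGet? xs (PySem.Int.mod (s + (i : Int)) (xs.length : Int))).getD 0)

-- Pre_ excludes exactly the inputs on which A raises: a positive size over an empty or
-- out-of-range-start circle (IndexError/ZeroDivisionError), and more total matches than
-- size_1, where the write matched[match_count] overflows A's scratch array (IndexError).
def Pre_return_linear (cir1 : List Int) (start_1 : Int) (size_1 : Int) (cir2 : List Int) (start_2 : Int) (size_2 : Int) : Prop :=
  size_1 ≤ 0 ∨
  (0 < cir1.length ∧
   (size_2 ≤ 0 ∨
    (0 < cir2.length ∧ -(cir1.length : Int) ≤ start_1 ∧ start_1 < (cir1.length : Int) ∧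
     -(cir2.length : Int) ≤ start_2 ∧ start_2 < (cir2.length : Int) ∧
     ((pvWin cir1 start_1 size_1).map
        (fun x => ((pvWin cir2 start_2 size_2).count x : Int))).sum ≤ size_1)))
instance (cir1 : List Int) (start_1 : Int) (size_1 : Int) (cir2 : List Int) (start_2 : Int) (size_2 : Int) : Decidable (Pre_return_linear cir1 start_1 size_1 cir2 start_2 size_2) := by unfold Pre_return_linear; infer_instance

def pvWitness_return_linear : List Int × Int × Int × List Int × Int × Int := ([1, 2, 3], 0, 3, [2, 3, 4], 1, 3)

def Spec_return_linear (cir1 : List Int) (start_1 : Int) (size_1 : Int) (cir2 : List Int) (start_2 : Int) (size_2 : Int) (out : List Int) : Prop := out = return_linear_alt cir1 start_1 size_1 cir2 start_2 size_2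
instance (cir1 : List Int) (start_1 : Int) (size_1 : Int) (cir2 : List Int) (start_2 : Int) (size_2 : Int) (out : List Int) : Decidable (Spec_return_linear cir1 start_1 size_1 cir2 start_2 size_2 out) := by unfold Spec_return_linear; infer_instance

-- ===== CLAIM (what is proved, stated in full; the proofs are below) =====
def Claim_equal_return_linear : Prop := ∀ (cir1 : List Int) (start_1 : Int) (size_1 : Int) (cir2 : List Int) (start_2 : Int) (size_2 : Int), Dom_return_linear cir1 start_1 size_1 cir2 start_2 size_2 → Pre_return_linear cir1 start_1 size_1 cir2 start_2 size_2 → Spec_return_linear cir1 start_1 size_1 cir2 start_2 size_2 (return_linear cir1 start_1 size_1 cir2 start_2 size_2)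

-- ===== LEMMAS AND PROOFS =====

-- proof-side helpers: named copies of A's loop bodies (definitionally equal to the inline lambdas)
def pvInnerBody (cir2 : List Int) (v1 : Int) : (Int × List Int × Int) → Int → (Int × List Int × Int) :=
  fun t _ =>
    let t' :=
      if v1 = (PySem.List.pyGet? cir2 t.1).getD 0 then
        (PySem.List.pySetD t.2.1 t.2.2 v1, t.2.2 + 1)
      else (t.2.1, t.2.2)
    (PySem.Int.mod (t.1 + 1) (cir2.length : Int), t'.1, t'.2)

def pvOuterBody (cir1 cir2 : List Int) (start_2 size_2 : Int) :
    (Int × Int × List Int × Int) → Int → (Int × Int × List Int × Int) :=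
  fun s _ =>
    let inner := (PySem.List.pyRange 0 size_2 1).foldl
      (pvInnerBody cir2 ((PySem.List.pyGet? cir1 s.1).getD 0)) (s.2.1, s.2.2.1, s.2.2.2)
    (PySem.Int.mod (s.1 + 1) (cir1.length : Int), start_2, inner.2)

theorem return_linear_eq (cir1 : List Int) (start_1 size_1 : Int) (cir2 : List Int) (start_2 size_2 : Int) :
    return_linear cir1 start_1 size_1 cir2 start_2 size_2 =
      (let st := (PySem.List.pyRange 0 size_1 1).foldl (pvOuterBody cir1 cir2 start_2 size_2)
        (start_1, start_2, List.replicate size_1.toNat 0, (0 : Int))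
       (PySem.List.pyRange 0 st.2.2.2 1).foldl
        (fun arr i => PySem.List.pySetD arr i ((PySem.List.pyGet? st.2.2.1 i).getD 0))
        (List.replicate st.2.2.2.toNat 0)) := rfl

-- the circular window as A's stepping recursion walks it
def pvWinN (xs : List Int) (s : Int) : Nat → List Int
  | 0 => []
  | k+1 => (PySem.List.pyGet? xs s).getD 0 :: pvWinN xs (PySem.Int.mod (s + 1) (xs.length : Int)) k

theorem pvMod_add (a b n : Int) (h : 0 < n) :
    PySem.Int.mod (PySem.Int.mod a n + b) n = PySem.Int.mod (a + b) n := by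
  simp [PySem.Int.mod_eq_emod_of_pos h]

theorem pvGet_anchor (xs : List Int) (s : Int) (h1 : -(xs.length : Int) ≤ s) (h2 : s < (xs.length : Int)) :
    PySem.List.pyGet? xs (PySem.Int.mod s (xs.length : Int)) = PySem.List.pyGet? xs s := by
  rcases (by omega : 0 ≤ s ∨ s < 0) with hs | hs
  · have h0 : (0 : Int) < (xs.length : Int) := lt_of_le_of_lt hs h2
    rw [PySem.Int.mod_eq_emod_of_pos h0, Int.emod_eq_of_lt hs h2]
  · have h0 : (0 : Int) < (xs.length : Int) := by omega
    have hm : PySem.Int.mod s (xs.length : Int) = s + (xs.length : Int) := by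
      rw [PySem.Int.mod_eq_emod_of_pos h0]
      have he := Int.add_mul_emod_self_left (a := s) (b := (xs.length : Int)) (c := 1)
      rw [mul_one] at he
      rw [← he]
      exact Int.emod_eq_of_lt (by omega) (by omega)
    rw [hm]
    simp only [PySem.List.pyGet?, PySem.List.pyIdx?]
    rw [if_pos (by omega : (0 : Int) ≤ s + (xs.length : Int)),
        if_neg (by omega : ¬ (0 : Int) ≤ s),
        if_pos (by omega : s + (xs.length : Int) < (xs.length : Int)), if_pos h1]
    congr 2
    omega

theorem pvWinN_anchor (xs : List Int) (s : Int) (k : Nat)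
    (h1 : -(xs.length : Int) ≤ s) (h2 : s < (xs.length : Int)) :
    pvWinN xs (PySem.Int.mod s (xs.length : Int)) k = pvWinN xs s k := by
  cases k with
  | zero => rfl
  | succ k =>
    have h0 : (0 : Int) < (xs.length : Int) := by omega
    simp only [pvWinN, pvGet_anchor xs s h1 h2, pvMod_add s 1 _ h0]

theorem pvWinN_eq_range (xs : List Int) (k : Nat) :
    ∀ s : Int, 0 ≤ s → s < (xs.length : Int) →
      pvWinN xs s k = (List.range k).map
        (fun (i : Nat) => (PySem.List.pyGet? xs (PySem.Int.mod (s + (i : Int)) (xs.length : Int))).getD 0) := by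
  induction k with
  | zero => intro s _ _; simp [pvWinN]
  | succ k ih =>
    intro s hs1 hs2
    have h0 : (0 : Int) < (xs.length : Int) := by omega
    rw [List.range_succ_eq_map]
    simp only [pvWinN, List.map_cons, List.map_map]
    refine congrArg₂ List.cons ?_ ?_
    · have hmod : PySem.Int.mod (s + ((0 : Nat) : Int)) (xs.length : Int) = s := by
        rw [Nat.cast_zero, add_zero, PySem.Int.mod_eq_emod_of_pos h0, Int.emod_eq_of_lt hs1 hs2]
      rw [hmod]
    · rw [ih (PySem.Int.mod (s + 1) (xs.length : Int)) (PySem.Int.mod_nonneg _ h0) (PySem.Int.mod_lt _ h0)]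
      apply List.map_congr_left
      intro i _
      simp only [Function.comp]
      rw [pvMod_add (s + 1) (i : Int) _ h0,
        show s + 1 + (i : Int) = s + ((i : Nat) + 1 : Nat) by push_cast; omega]

theorem pvWin_eq_winN (xs : List Int) (s cnt : Int)
    (h1 : -(xs.length : Int) ≤ s) (h2 : s < (xs.length : Int)) :
    pvWin xs s cnt = pvWinN xs s cnt.toNat := by
  have h0 : (0 : Int) < (xs.length : Int) := by omega
  rw [← pvWinN_anchor xs s _ h1 h2,
      pvWinN_eq_range xs _ _ (PySem.Int.mod_nonneg _ h0) (PySem.Int.mod_lt _ h0)]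
  unfold pvWin
  apply List.map_congr_left
  intro i _
  rw [pvMod_add s (i : Int) _ h0]

theorem pvCopy (src : List Int) (c : Nat) :
    ∀ arr : List Int, c ≤ src.length → c ≤ arr.length →
      (PySem.List.pyRange 0 (c : Int) 1).foldl
        (fun arr i => PySem.List.pySetD arr i ((PySem.List.pyGet? src i).getD 0)) arr
        = src.take c ++ arr.drop c := by
  induction c with
  | zero => intro arr _ _; simp [PySem.List.pyRange_one_eq_nil]
  | succ c ih =>
    intro arr h1 h2
    have hcast : ((c + 1 : Nat) : Int) = (c : Int) + 1 := by push_cast; omega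
    rw [hcast, PySem.List.pyRange_one_succ_right (by positivity), List.foldl_append,
        ih arr (by omega) (by omega)]
    simp only [List.foldl_cons, List.foldl_nil]
    have hc1 : c < src.length := by omega
    have hc2 : c < arr.length := by omega
    have hv : (PySem.List.pyGet? src (c : Int)).getD 0 = src[c] := by
      simp [List.getElem?_eq_getElem hc1]
    rw [PySem.List.pySetD_natCast, hv, List.set_append]
    rw [if_neg (by simp only [List.length_take]; omega)]
    have hlt : (List.take c src).length = c := by simp; omega
    rw [hlt, Nat.sub_self, List.drop_eq_getElem_cons hc2, List.set_cons_zero]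
    have htk : List.take (c + 1) src = List.take c src ++ [src[c]] := by
      rw [List.take_add_one, List.getElem?_eq_getElem hc1]
      rfl
    rw [htk, List.append_assoc]
    rfl

theorem pvTakeMid (A B C : List Int) : (A ++ B ++ C).take (A.length + B.length) = A ++ B := by
  rw [← List.length_append, List.take_left]

theorem pvDropMid (A B C : List Int) (j : Nat) : (A ++ B ++ C).drop (A.length + B.length + j) = C.drop j := by
  rw [← List.length_append, ← List.drop_drop, List.drop_left]

theorem pvInnerA (cir2 : List Int) (v1 : Int) (L : List Int) :
    ∀ (s2 : Int) (matched : List Int) (m : Nat),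
      m + (pvWinN cir2 s2 L.length).count v1 ≤ matched.length →
      (L.foldl (pvInnerBody cir2 v1) (s2, matched, (m : Int))).2 =
        (matched.take m ++ List.replicate ((pvWinN cir2 s2 L.length).count v1) v1
          ++ matched.drop (m + (pvWinN cir2 s2 L.length).count v1),
         (m : Int) + ((pvWinN cir2 s2 L.length).count v1 : Int)) := by
  induction L with
  | nil => intro s2 matched m h; simp [pvWinN]
  | cons a L ih =>
    intro s2 matched m h
    have hwin : pvWinN cir2 s2 (a :: L).length =
        (PySem.List.pyGet? cir2 s2).getD 0 ::
          pvWinN cir2 (PySem.Int.mod (s2 + 1) (cir2.length : Int)) L.length := rfl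
    set s2' := PySem.Int.mod (s2 + 1) (cir2.length : Int) with hs2'
    set c' := (pvWinN cir2 s2' L.length).count v1 with hc'
    by_cases hv : v1 = (PySem.List.pyGet? cir2 s2).getD 0
    · have hcount : (pvWinN cir2 s2 (a :: L).length).count v1 = c' + 1 := by
        rw [hwin, List.count_cons]
        simp [← hv, hc']
      rw [hcount] at h ⊢
      have hm : m < matched.length := by omega
      have hstep : pvInnerBody cir2 v1 (s2, matched, (m : Int)) a =
          (s2', matched.set m v1, ((m + 1 : Nat) : Int)) := by
        simp only [pvInnerBody, if_pos hv, PySem.List.pySetD_natCast, ← hs2']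
        push_cast
        rfl
      have hset : matched.set m v1 = List.take m matched ++ v1 :: List.drop (m + 1) matched :=
        List.set_eq_take_cons_drop v1 hm
      have hlen : (List.take m matched).length = m := by
        simp only [List.length_take]
        omega
      have htake : (matched.set m v1).take (m + 1) = List.take m matched ++ [v1] := by
        rw [hset, List.take_append, hlen, List.take_of_length_le (by omega)]
        rw [show m + 1 - m = 1 by omega]
        rfl
      have hdropm : ∀ j : Nat, (matched.set m v1).drop (m + 1 + j) = matched.drop (m + 1 + j) := by
        intro j
        rw [hset, List.drop_append, hlen, List.drop_of_length_le (by omega)]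
        rw [show m + 1 + j - m = j + 1 by omega]
        simp only [List.drop_succ_cons, List.drop_drop, List.nil_append]
      rw [List.foldl_cons, hstep, ih s2' (matched.set m v1) (m + 1) (by simp only [List.length_set]; omega)]
      refine congrArg₂ Prod.mk ?_ (by push_cast; omega)
      rw [htake, hdropm c', show m + 1 + c' = m + (c' + 1) from by omega]
      simp [List.append_assoc, List.replicate_succ]
      exact hc'.symm
    · have hcount : (pvWinN cir2 s2 (a :: L).length).count v1 = c' := by
        rw [hwin, List.count_cons,
          if_neg (by simp only [beq_iff_eq]; exact fun hh => hv hh.symm), add_zero]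
      rw [hcount] at h ⊢
      have hstep : pvInnerBody cir2 v1 (s2, matched, (m : Int)) a = (s2', matched, (m : Int)) := by
        simp only [pvInnerBody, if_neg hv, ← hs2']
      rw [List.foldl_cons, hstep, ih s2' matched m (by omega)]

theorem pvOuterA (cir1 cir2 : List Int) (start_2 size_2 : Int) (L1 : List Int) :
    ∀ (s1 : Int) (matched : List Int) (m : Nat),
      m + ((pvWinN cir1 s1 L1.length).map
            (fun x => (pvWinN cir2 start_2 (PySem.List.pyRange 0 size_2 1).length).count x)).sum
          ≤ matched.length →
      (L1.foldl (pvOuterBody cir1 cir2 start_2 size_2) (s1, start_2, matched, (m : Int))).2.2 =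
        (matched.take m ++
          (pvWinN cir1 s1 L1.length).flatMap
            (fun x => List.replicate ((pvWinN cir2 start_2 (PySem.List.pyRange 0 size_2 1).length).count x) x)
          ++ matched.drop (m + ((pvWinN cir1 s1 L1.length).map
              (fun x => (pvWinN cir2 start_2 (PySem.List.pyRange 0 size_2 1).length).count x)).sum),
         (m : Int) + (((pvWinN cir1 s1 L1.length).map
              (fun x => (pvWinN cir2 start_2 (PySem.List.pyRange 0 size_2 1).length).count x)).sum : Int)) := by
  induction L1 with
  | nil => intro s1 matched m h; simp [pvWinN]
  | cons a L1 ih =>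
    intro s1 matched m h
    have hwin : pvWinN cir1 s1 (a :: L1).length =
        (PySem.List.pyGet? cir1 s1).getD 0 ::
          pvWinN cir1 (PySem.Int.mod (s1 + 1) (cir1.length : Int)) L1.length := rfl
    rw [hwin, List.map_cons, List.sum_cons] at h
    rw [hwin, List.map_cons, List.sum_cons, List.flatMap_cons]
    have hstep : pvOuterBody cir1 cir2 start_2 size_2 (s1, start_2, matched, (m : Int)) a =
        (PySem.Int.mod (s1 + 1) (cir1.length : Int), start_2,
          matched.take m ++
            List.replicate ((pvWinN cir2 start_2 (PySem.List.pyRange 0 size_2 1).length).count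
              ((PySem.List.pyGet? cir1 s1).getD 0)) ((PySem.List.pyGet? cir1 s1).getD 0) ++
            matched.drop (m + (pvWinN cir2 start_2 (PySem.List.pyRange 0 size_2 1).length).count
              ((PySem.List.pyGet? cir1 s1).getD 0)),
          ((m + (pvWinN cir2 start_2 (PySem.List.pyRange 0 size_2 1).length).count
              ((PySem.List.pyGet? cir1 s1).getD 0) : Nat) : Int)) := by
      simp only [pvOuterBody]
      rw [pvInnerA cir2 ((PySem.List.pyGet? cir1 s1).getD 0) (PySem.List.pyRange 0 size_2 1)
            start_2 matched m (by omega)]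
      refine congrArg₂ Prod.mk rfl (congrArg₂ Prod.mk rfl (congrArg₂ Prod.mk rfl ?_))
      push_cast
      omega
    rw [List.foldl_cons, hstep,
        ih (PySem.Int.mod (s1 + 1) (cir1.length : Int)) _ _ (by
          simp only [List.length_append, List.length_replicate, List.length_take, List.length_drop]
          omega)]
    have e1 : (List.take m matched).length = m := by
      simp only [List.length_take]
      omega
    have hpre := pvTakeMid (List.take m matched)
      (List.replicate ((pvWinN cir2 start_2 (PySem.List.pyRange 0 size_2 1).length).count
          ((PySem.List.pyGet? cir1 s1).getD 0)) ((PySem.List.pyGet? cir1 s1).getD 0))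
      (matched.drop (m + (pvWinN cir2 start_2 (PySem.List.pyRange 0 size_2 1).length).count
          ((PySem.List.pyGet? cir1 s1).getD 0)))
    rw [e1, List.length_replicate] at hpre
    have hdrop := pvDropMid (List.take m matched)
      (List.replicate ((pvWinN cir2 start_2 (PySem.List.pyRange 0 size_2 1).length).count
          ((PySem.List.pyGet? cir1 s1).getD 0)) ((PySem.List.pyGet? cir1 s1).getD 0))
      (matched.drop (m + (pvWinN cir2 start_2 (PySem.List.pyRange 0 size_2 1).length).count
          ((PySem.List.pyGet? cir1 s1).getD 0)))
      (((pvWinN cir1 (PySem.Int.mod (s1 + 1) (cir1.length : Int)) L1.length).map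
          (fun x => (pvWinN cir2 start_2 (PySem.List.pyRange 0 size_2 1).length).count x)).sum)
    rw [e1, List.length_replicate] at hdrop
    rw [hpre, hdrop, List.drop_drop]
    refine congrArg₂ Prod.mk ?_ (by push_cast; omega)
    rw [show m + (pvWinN cir2 start_2 (PySem.List.pyRange 0 size_2 1).length).count
          ((PySem.List.pyGet? cir1 s1).getD 0) +
          ((pvWinN cir1 (PySem.Int.mod (s1 + 1) (cir1.length : Int)) L1.length).map
            (fun x => (pvWinN cir2 start_2 (PySem.List.pyRange 0 size_2 1).length).count x)).sum
        = m + ((pvWinN cir2 start_2 (PySem.List.pyRange 0 size_2 1).length).count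
            ((PySem.List.pyGet? cir1 s1).getD 0) +
           ((pvWinN cir1 (PySem.Int.mod (s1 + 1) (cir1.length : Int)) L1.length).map
            (fun x => (pvWinN cir2 start_2 (PySem.List.pyRange 0 size_2 1).length).count x)).sum)
        from by omega]
    simp [List.append_assoc]

theorem pvSumCast (l : List Int) (f : Int → Nat) :
    (l.map (fun x => ((f x : Nat) : Int))).sum = ((l.map f).sum : Int) := by
  induction l with
  | nil => simp
  | cons a t ih => simp [ih]

theorem pvFlatLen (W1 W2 : List Int) :
    (W1.flatMap (fun x => List.replicate (W2.count x) x)).length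
      = (W1.map (fun x => W2.count x)).sum := by
  simp [List.length_flatMap]

theorem pvMapRange (n : Int) (f : Int → Int) :
    (PySem.List.pyRange 0 n 1).map f = (List.range n.toNat).map (fun (i : Nat) => f (i : Int)) := by
  rw [PySem.List.pyRange_one, List.map_map, sub_zero]
  apply List.map_congr_left
  intro k _
  simp

theorem pvB_char (cir1 : List Int) (start_1 size_1 : Int) (cir2 : List Int) (start_2 size_2 : Int)
    (hz : ¬ size_1 ≤ 0) :
    return_linear_alt cir1 start_1 size_1 cir2 start_2 size_2 =
      (pvWin cir1 start_1 size_1).flatMap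
        (fun x => List.replicate ((pvWin cir2 start_2 size_2).count x) x) := by
  unfold return_linear_alt
  rw [if_neg hz]
  have hcounts : (PySem.List.pyRange 0 size_2 1).foldl
      (fun (d : PySem.Dict Int Int) j =>
        d.insert ((PySem.List.pyGet? cir2 (PySem.Int.mod (start_2 + j) (cir2.length : Int))).getD 0)
          (d.getD ((PySem.List.pyGet? cir2 (PySem.Int.mod (start_2 + j) (cir2.length : Int))).getD 0) 0 + 1))
      PySem.Dict.empty
      = PySem.Dict.counter (pvWin cir2 start_2 size_2) := by
    rw [← List.foldl_map
          (f := fun j => (PySem.List.pyGet? cir2 (PySem.Int.mod (start_2 + j) (cir2.length : Int))).getD 0)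
          (g := fun (d : PySem.Dict Int Int) v => d.insert v (d.getD v 0 + 1)),
        pvMapRange,
        show ((List.range size_2.toNat).map
          (fun (i : Nat) => (PySem.List.pyGet? cir2 (PySem.Int.mod (start_2 + (i : Int)) (cir2.length : Int))).getD 0))
          = pvWin cir2 start_2 size_2 from rfl,
        PySem.Dict.foldl_insert_getD_add_one_eq_counter]
  simp only [hcounts]
  rw [PySem.List.foldl_append_eq_flatMap
        (g := fun i => List.replicate
          (((PySem.Dict.counter (pvWin cir2 start_2 size_2)).getD
            ((PySem.List.pyGet? cir1 (PySem.Int.mod (start_1 + i) (cir1.length : Int))).getD 0) 0).toNat)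
          ((PySem.List.pyGet? cir1 (PySem.Int.mod (start_1 + i) (cir1.length : Int))).getD 0)),
      List.nil_append]
  rw [PySem.List.pyRange_one, List.flatMap_map, sub_zero,
      show pvWin cir1 start_1 size_1 = (List.range size_1.toNat).map
        (fun (i : Nat) => (PySem.List.pyGet? cir1 (PySem.Int.mod (start_1 + (i : Int)) (cir1.length : Int))).getD 0)
        from rfl,
      List.flatMap_map]
  congr 1
  funext i
  simp [PySem.Dict.getD_counter]

theorem pvA_char (cir1 : List Int) (start_1 size_1 : Int) (cir2 : List Int) (start_2 size_2 : Int)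
    (hb : ((pvWinN cir1 start_1 (PySem.List.pyRange 0 size_1 1).length).map
        (fun x => (pvWinN cir2 start_2 (PySem.List.pyRange 0 size_2 1).length).count x)).sum ≤ size_1.toNat) :
    return_linear cir1 start_1 size_1 cir2 start_2 size_2 =
      (pvWinN cir1 start_1 (PySem.List.pyRange 0 size_1 1).length).flatMap
        (fun x => List.replicate ((pvWinN cir2 start_2 (PySem.List.pyRange 0 size_2 1).length).count x) x) := by
  rw [return_linear_eq]
  have hout := pvOuterA cir1 cir2 start_2 size_2 (PySem.List.pyRange 0 size_1 1) start_1
    (List.replicate size_1.toNat 0) 0 (by simpa using hb)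
  simp only [Nat.cast_zero, zero_add, List.take_zero, List.nil_append] at hout
  simp only [hout, Int.toNat_natCast]
  rw [pvCopy _ _ _
        (by rw [List.length_append, pvFlatLen]
            simp only [List.length_drop, List.length_replicate]
            omega)
        (by simp)]
  rw [List.take_left' (pvFlatLen _ _)]
  simp

-- ===== VERDICT (by name: the statement is the Claim_ definition above) =====
theorem return_linear_spec : Claim_equal_return_linear := by
  intro cir1 start_1 size_1 cir2 start_2 size_2 _ hpre
  unfold Spec_return_linear
  by_cases hz : size_1 ≤ 0
  · have hA : return_linear cir1 start_1 size_1 cir2 start_2 size_2 = [] := by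
      rw [return_linear_eq]
      simp [PySem.List.pyRange_one_eq_nil hz, PySem.List.pyRange_one_eq_nil (le_refl (0 : Int))]
    have hB : return_linear_alt cir1 start_1 size_1 cir2 start_2 size_2 = [] := by
      unfold return_linear_alt
      rw [if_pos hz]
    rw [hA, hB]
  · obtain ⟨hn1, hrest⟩ := hpre.resolve_left hz
    rcases hrest with hs2le | ⟨hn2, ha1, ha2, hb1, hb2, hsum⟩
    · have hK : (PySem.List.pyRange 0 size_2 1).length = 0 := by
        rw [PySem.List.length_pyRange_one]
        omega
      have hA := pvA_char cir1 start_1 size_1 cir2 start_2 size_2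
        (by rw [hK]; simp [pvWinN])
      rw [hA, pvB_char _ _ _ _ _ _ hz, hK]
      have h2b : pvWin cir2 start_2 size_2 = [] := by
        unfold pvWin
        rw [show size_2.toNat = 0 by omega]
        rfl
      rw [h2b, show pvWinN cir2 start_2 0 = [] from rfl]
      have hnil : ∀ l : List Int, l.flatMap (fun _ => ([] : List Int)) = [] := by
        intro l
        induction l with
        | nil => rfl
        | cons x t ih => simp [ih]
      simp only [List.count_nil, List.replicate_zero, hnil]
    · have hlen1 : (PySem.List.pyRange 0 size_1 1).length = size_1.toNat := by
        rw [PySem.List.length_pyRange_one, sub_zero]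
      have hlen2 : (PySem.List.pyRange 0 size_2 1).length = size_2.toNat := by
        rw [PySem.List.length_pyRange_one, sub_zero]
      have hw1 : pvWin cir1 start_1 size_1 = pvWinN cir1 start_1 size_1.toNat :=
        pvWin_eq_winN _ _ _ ha1 ha2
      have hw2 : pvWin cir2 start_2 size_2 = pvWinN cir2 start_2 size_2.toNat :=
        pvWin_eq_winN _ _ _ hb1 hb2
      have hbound : ((pvWinN cir1 start_1 (PySem.List.pyRange 0 size_1 1).length).map
          (fun x => (pvWinN cir2 start_2 (PySem.List.pyRange 0 size_2 1).length).count x)).sum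
          ≤ size_1.toNat := by
        rw [hlen1, hlen2]
        rw [hw1, hw2, pvSumCast] at hsum
        omega
      rw [pvA_char _ _ _ _ _ _ hbound, pvB_char _ _ _ _ _ _ hz, hw1, hw2, hlen1, hlen2]
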